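-- pv_equiv track=rewrite | github.com/poa00/py.acronym | acr_id.py | vector_values
-- ===== SOURCE A (Python) =====
-- def vector_values(vector, types):
--     misses = 0
--     stopcount = 0
--
--     # calculate size
--     i = 0
--     while i < len(vector) and vector[i] == 0:
--         i += 1
--     first = i
--     i = len(vector)-1
--     while i >= 0 and vector[i] == 0:
--         i -= 1
--     last = i
--     size = last - first + 1
--
--     #calculate distance
--     distance = (len(vector)-1) - last
--
--     # calculate misses and stopcount
--     for i in range(first, last+1):
--         if vector[i] > 0 and types[i] == 's':
--             stopcount += 1
--         elif vector[i] == 0 and types[i] != 's' and types[i] != 'h':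
--             misses += 1
--
--     return misses, stopcount, distance, size
-- ===== SOURCE B (Python) =====
-- def vector_values(vector, types):
--     # One forward pass: track first/last nonzero index, count stops at nonzero
--     # positions, and buffer zero indices since first, committing them as misses
--     # only when a later nonzero proves they lie inside [first, last].
--     n = len(vector)
--     first = None
--     last = -1
--     stopcount = 0
--     misses = 0
--     pending = []
--     for i, v in enumerate(vector):
--         if v != 0:
--             if first is None:
--                 first = i
--             last = i
--             for j in pending:
--                 if types[j] != 's' and types[j] != 'h':
--                     misses += 1
--             pending = []
--             if v > 0 and types[i] == 's':
--                 stopcount += 1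
--         elif first is not None:
--             pending.append(i)
--     if first is None:
--         first = n
--     return misses, stopcount, (n - 1) - last, last - first + 1
-- ===== Notes on version B (the rewrite author's own statement) =====
-- stated objective: alternative
-- what changed: A's three index-based passes (forward while over leading zeros, backward while over trailing zeros, then a counting for-loop over [first,last]) are replaced by one forward enumerate pass that tracks first/last nonzero, counts stops at nonzero entries, and buffers zero indices, committing them as misses only when a later nonzero proves they lie inside [first,last].
import Mathlib
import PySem

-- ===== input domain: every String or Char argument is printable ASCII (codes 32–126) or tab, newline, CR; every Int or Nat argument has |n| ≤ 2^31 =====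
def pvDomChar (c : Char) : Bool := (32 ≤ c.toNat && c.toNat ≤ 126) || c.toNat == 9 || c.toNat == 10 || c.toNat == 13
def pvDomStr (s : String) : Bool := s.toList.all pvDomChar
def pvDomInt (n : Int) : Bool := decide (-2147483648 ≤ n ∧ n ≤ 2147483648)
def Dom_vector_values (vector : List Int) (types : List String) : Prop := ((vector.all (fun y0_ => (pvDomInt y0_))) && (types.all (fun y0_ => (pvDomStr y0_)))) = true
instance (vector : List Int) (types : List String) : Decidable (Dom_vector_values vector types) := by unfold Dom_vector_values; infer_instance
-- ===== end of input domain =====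

-- B replaces A's three index-based passes (leading-zero scan, backward trailing-zero scan,
-- counting loop over [first, last]) by one forward pass with a deferred buffer of zero indices.

-- ===== PORT A =====
-- first while loop: i advances over the leading zeros; aLead xs = final i
def aLead : List Int → Nat
  | [] => 0
  | v :: r => if v = 0 then aLead r + 1 else 0

-- second while loop: i runs from len-1 downward while vector[i] == 0; fuel k = i + 1
def aLastScan (vector : List Int) : Nat → Int
  | 0 => -1
  | k + 1 => if vector.getD k 0 = 0 then aLastScan vector k else (k : Int)

-- body of the for loop; state = (misses, stopcount)
def aStep (vector : List Int) (types : List String) (ms : Int × Int) (i : Int) : Int × Int :=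
  let v := PySem.List.pyGetD vector i 0
  let t := PySem.List.pyGetD types i ""
  if v > 0 ∧ t = "s" then (ms.1, ms.2 + 1)
  else if v = 0 ∧ t ≠ "s" ∧ t ≠ "h" then (ms.1 + 1, ms.2)
  else ms

def vector_values (vector : List Int) (types : List String) : Int × Int × Int × Int :=
  let n : Int := vector.length
  let first : Int := aLead vector
  let last : Int := aLastScan vector vector.length
  let size : Int := last - first + 1
  let distance : Int := (n - 1) - last
  let ms := (PySem.List.pyRange first (last + 1)).foldl (aStep vector types) (0, 0)
  (ms.1, ms.2, distance, size)

-- ===== PORT B =====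
-- loop state of B's single pass
structure BSt where
  first : Option Int
  last : Int
  stop : Int
  miss : Int
  pending : List Int
deriving Repr, DecidableEq

-- inner for loop of B: commit the buffered zero indices as misses
def bCommit (types : List String) (miss : Int) (pending : List Int) : Int :=
  pending.foldl (fun m j =>
    if PySem.List.pyGetD types j "" ≠ "s" ∧ PySem.List.pyGetD types j "" ≠ "h" then m + 1 else m) miss

def bStep (types : List String) (s : BSt) (iv : Int × Int) : BSt :=
  if iv.2 ≠ 0 then
    { first := some (s.first.getD iv.1)
      last := iv.1
      stop := if iv.2 > 0 ∧ PySem.List.pyGetD types iv.1 "" = "s" then s.stop + 1 else s.stop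
      miss := bCommit types s.miss s.pending
      pending := [] }
  else if s.first.isSome then { s with pending := s.pending ++ [iv.1] }
  else s

def vector_values_alt (vector : List Int) (types : List String) : Int × Int × Int × Int :=
  let n : Int := vector.length
  let s := (PySem.List.enumerate vector 0).foldl (bStep types) ⟨none, -1, 0, 0, []⟩
  let first : Int := s.first.getD n
  (s.miss, s.stop, (n - 1) - s.last, s.last - first + 1)

-- ===== PRECONDITION & SPEC =====
-- Pre_ excludes exactly the inputs where Python A raises IndexError: the counting loop reads
-- types[i] for every i in [first, last] whose entry is ≥ 0 (negative entries are skipped by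
-- `and` short-circuiting), so every such i must be a valid index of types.
def Pre_vector_values (vector : List Int) (types : List String) : Prop :=
  ∀ i < vector.length, 0 ≤ vector.getD i 0 →
    (∃ j < vector.length, j ≤ i ∧ vector.getD j 0 ≠ 0) →
    (∃ j < vector.length, i ≤ j ∧ vector.getD j 0 ≠ 0) →
    i < types.length
instance (vector : List Int) (types : List String) : Decidable (Pre_vector_values vector types) := by
  unfold Pre_vector_values; infer_instance

def pvWitness_vector_values : List Int × List String := ([1, 0, 2], ["s", "x", "s"])

def Spec_vector_values (vector : List Int) (types : List String) (out : Int × Int × Int × Int) : Prop := out = vector_values_alt vector types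
instance (vector : List Int) (types : List String) (out : Int × Int × Int × Int) : Decidable (Spec_vector_values vector types out) := by unfold Spec_vector_values; infer_instance

-- ===== CLAIM (what is proved, stated in full; the proofs are below) =====
def Claim_equal_vector_values : Prop := ∀ (vector : List Int) (types : List String), Dom_vector_values vector types → Pre_vector_values vector types → Spec_vector_values vector types (vector_values vector types)

-- ===== LEMMAS AND PROOFS =====

theorem aLead_le (xs : List Int) : aLead xs ≤ xs.length := by
  induction xs with
  | nil => simp [aLead]
  | cons v r ih =>
    by_cases h : v = 0
    · simp [aLead, h]; omega
    · simp [aLead, h]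

theorem aLead_append (xs : List Int) (x : Int) :
    aLead (xs ++ [x]) =
      if aLead xs = xs.length then (if x = 0 then xs.length + 1 else xs.length) else aLead xs := by
  induction xs with
  | nil => by_cases h : x = 0 <;> simp [aLead, h]
  | cons v r ih =>
    by_cases hv : v = 0
    · simp only [List.cons_append, aLead, if_pos hv, ih, List.length_cons]
      by_cases h1 : aLead r = r.length
      · simp [h1]; split_ifs <;> rfl
      · simp [h1]
    · simp [aLead, hv]

theorem aLastScan_congr (xs : List Int) (x : Int) (k : Nat) (hk : k ≤ xs.length) :
    aLastScan (xs ++ [x]) k = aLastScan xs k := by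
  induction k with
  | zero => simp [aLastScan]
  | succ m ih =>
    have hm : m < xs.length := by omega
    rw [aLastScan, aLastScan, List.getD_append _ _ _ _ hm, ih (by omega)]

theorem aLastScan_append (xs : List Int) (x : Int) :
    aLastScan (xs ++ [x]) (xs.length + 1) =
      if x = 0 then aLastScan xs xs.length else (xs.length : Int) := by
  have hx : (xs ++ [x]).getD xs.length 0 = x := by
    simp [List.getD_eq_getElem?_getD]
  rw [aLastScan, hx]
  by_cases h : x = 0
  · rw [if_pos h, if_pos h, aLastScan_congr xs x _ le_rfl]
  · simp [h]

-- a run of zero entries contributes to (misses, stop) exactly as bCommit does to misses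
theorem aStep_zero_run (vector : List Int) (types : List String) (l : List Int)
    (hz : ∀ j ∈ l, PySem.List.pyGetD vector j 0 = 0) (m st : Int) :
    l.foldl (aStep vector types) (m, st) = (bCommit types m l, st) := by
  induction l generalizing m with
  | nil => simp [bCommit]
  | cons j l ih =>
    have hj : PySem.List.pyGetD vector j 0 = 0 := hz j (List.mem_cons_self ..)
    have hrest : ∀ i ∈ l, PySem.List.pyGetD vector i 0 = 0 := fun i hi => hz i (List.mem_cons_of_mem _ hi)
    simp only [List.foldl_cons, bCommit] at *
    rw [show aStep vector types (m, st) j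
        = (if PySem.List.pyGetD types j "" ≠ "s" ∧ PySem.List.pyGetD types j "" ≠ "h" then m + 1 else m, st) from ?_]
    · exact ih hrest _
    · simp only [aStep, hj]
      split_ifs with h1 h2 <;> simp_all

theorem pyGetD_append_lt {α : Type} (xs ys : List α) (i : Int) (d : α)
    (h0 : 0 ≤ i) (h1 : i < (xs.length : Int)) :
    PySem.List.pyGetD (xs ++ ys) i d = PySem.List.pyGetD xs i d := by
  rw [PySem.List.pyGetD_of_nonneg _ _ h0, PySem.List.pyGetD_of_nonneg _ _ h0,
    List.getD_append _ _ _ _ (by omega)]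

theorem pyGetD_append_last {α : Type} (xs : List α) (x : α) (d : α) :
    PySem.List.pyGetD (xs ++ [x]) (xs.length : Int) d = x := by
  rw [PySem.List.pyGetD_of_nonneg _ _ (by positivity)]
  simp [List.getD_eq_getElem?_getD]

-- the invariant of B's single pass, stated against A's first/last scans and counting loop
def BInv (types : List String) (xs : List Int) (s : BSt) : Prop :=
  (s.first = if aLead xs = xs.length then none else some (aLead xs : Int)) ∧
  s.last = aLastScan xs xs.length ∧
  (s.miss, s.stop) = (PySem.List.pyRange (aLead xs) (aLastScan xs xs.length + 1)).foldl (aStep xs types) (0, 0) ∧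
  (s.pending = if aLead xs = xs.length then []
    else PySem.List.pyRange (aLastScan xs xs.length + 1) xs.length) ∧
  (∀ j : Nat, aLastScan xs xs.length < (j : Int) → j < xs.length → xs.getD j 0 = 0) ∧
  (-1 ≤ aLastScan xs xs.length) ∧ (aLastScan xs xs.length < (xs.length : Int)) ∧
  (aLead xs = xs.length ↔ aLastScan xs xs.length = -1) ∧
  (aLead xs ≠ xs.length → (aLead xs : Int) ≤ aLastScan xs xs.length)

theorem bFold_inv (types : List String) (xs : List Int) :
    BInv types xs ((PySem.List.enumerate xs 0).foldl (bStep types) ⟨none, -1, 0, 0, []⟩) := by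
  induction xs using List.reverseRecOn with
  | nil =>
    refine ⟨rfl, rfl, ?_, rfl, ?_, ?_, ?_, ?_, ?_⟩ <;>
      simp [aLead, aLastScan, PySem.List.pyRange_one_eq_nil]
  | append_singleton xs x ih =>
    obtain ⟨h1, h2, h3, h4, h5, h6, h7, h8, h9⟩ := ih
    set s := (PySem.List.enumerate xs 0).foldl (bStep types) ⟨none, -1, 0, 0, []⟩ with hs
    have hfold : (PySem.List.enumerate (xs ++ [x]) 0).foldl (bStep types) ⟨none, -1, 0, 0, []⟩
        = bStep types s ((xs.length : Int), x) := by
      rw [PySem.List.enumerate_append]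
      simp [PySem.List.enumerate, List.foldl_append, ← hs]
    rw [hfold]
    have hn1 : (xs ++ [x]).length = xs.length + 1 := by simp
    have hfle := aLead_le xs
    have hgz : ∀ j ∈ PySem.List.pyRange (aLastScan xs xs.length + 1) (xs.length : Int),
        PySem.List.pyGetD (xs ++ [x]) j 0 = 0 := by
      intro j hj
      rw [PySem.List.mem_pyRange_one] at hj
      rw [pyGetD_append_lt _ _ _ _ (by omega) hj.2,
        PySem.List.pyGetD_of_nonneg _ _ (by omega)]
      exact h5 j.toNat (by omega) (by omega)
    have hcongr : ∀ init : Int × Int,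
        (PySem.List.pyRange (aLead xs : Int) (aLastScan xs xs.length + 1)).foldl
          (aStep (xs ++ [x]) types) init
        = (PySem.List.pyRange (aLead xs : Int) (aLastScan xs xs.length + 1)).foldl
          (aStep xs types) init := by
      intro init
      refine PySem.List.foldl_congr_mem _ _ _ _ ?_
      intro acc i hi
      rw [PySem.List.mem_pyRange_one] at hi
      obtain ⟨hi1, hi2⟩ := hi
      simp only [aStep]
      rw [pyGetD_append_lt _ _ _ _ (by omega) (by omega)]
    by_cases hx : x = 0
    · by_cases hf : aLead xs = xs.length
      · -- zero appended to an all-zero prefix; state unchanged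
        have hsfirst : s.first = none := by rw [h1, if_pos hf]
        have hstep : bStep types s ((xs.length : Int), x) = s := by
          simp [bStep, hx, hsfirst]
        have hl' : aLead (xs ++ [x]) = xs.length + 1 := by
          rw [aLead_append, if_pos hf, if_pos hx]
        have hL' : aLastScan (xs ++ [x]) (xs ++ [x]).length = -1 := by
          rw [hn1, aLastScan_append, if_pos hx]; exact h8.mp hf
        have hL : aLastScan xs xs.length = -1 := h8.mp hf
        refine ⟨?_, ?_, ?_, ?_, ?_, ?_, ?_, ?_, ?_⟩
        · rw [hstep, hsfirst, if_pos (by rw [hl', hn1])]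
        · rw [hstep, h2, hL, hL']
        · rw [hstep, hL', hl']
          rw [PySem.List.pyRange_one_eq_nil (by push_cast; omega), List.foldl_nil]
          rw [h3, hL, PySem.List.pyRange_one_eq_nil (by push_cast; omega), List.foldl_nil]
        · rw [hstep, h4, if_pos hf, if_pos (by rw [hl', hn1])]
        · intro j _ hj
          by_cases hjn : j < xs.length
          · rw [List.getD_append _ _ _ _ hjn]
            exact h5 j (by omega) hjn
          · have hjx : j = xs.length := by rw [hn1] at hj; omega
            subst hjx
            simpa [List.getD_eq_getElem?_getD] using hx
        · rw [hL']
        · rw [hL', hn1]; push_cast; omega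
        · rw [hL', hl', hn1]; exact iff_of_true rfl rfl
        · intro hcon; exact absurd (by rw [hl', hn1]) hcon
      · -- zero appended after a nonzero: buffer its index
        have hsfirst : s.first = some (aLead xs : Int) := by rw [h1, if_neg hf]
        have hstep : bStep types s ((xs.length : Int), x) =
            { s with pending := s.pending ++ [(xs.length : Int)] } := by
          simp [bStep, hx, hsfirst]
        have hl' : aLead (xs ++ [x]) = aLead xs := by
          rw [aLead_append, if_neg hf]
        have hL' : aLastScan (xs ++ [x]) (xs ++ [x]).length = aLastScan xs xs.length := by
          rw [hn1, aLastScan_append, if_pos hx]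
        have hfL : (aLead xs : Int) ≤ aLastScan xs xs.length := h9 hf
        refine ⟨?_, ?_, ?_, ?_, ?_, ?_, ?_, ?_, ?_⟩
        · rw [hstep, hsfirst, hl', if_neg (by rw [hn1]; omega)]
        · rw [hstep, hL']; exact h2
        · rw [hstep, hL', hl']
          show (s.miss, s.stop) = _
          rw [hcongr]; exact h3
        · rw [hstep, hL', hl', if_neg (by rw [hn1]; omega), h4, if_neg hf, hn1]
          push_cast
          rw [PySem.List.pyRange_one_succ_right (by omega)]
        · intro j hj1 hj2
          rw [hL'] at hj1
          by_cases hjn : j < xs.length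
          · rw [List.getD_append _ _ _ _ hjn]
            exact h5 j hj1 hjn
          · have hjx : j = xs.length := by rw [hn1] at hj2; omega
            subst hjx
            simpa [List.getD_eq_getElem?_getD] using hx
        · rw [hL']; exact h6
        · rw [hL', hn1]; push_cast; omega
        · rw [hL', hl', hn1]
          constructor
          · intro hcon; omega
          · intro hcon; exact absurd (h8.mpr hcon) hf
        · intro _; rw [hL', hl']; exact hfL
    · -- nonzero appended
      have hl'any : aLead (xs ++ [x]) = if aLead xs = xs.length then xs.length else aLead xs := by
        rw [aLead_append]
        by_cases hf : aLead xs = xs.length <;> simp [hf, hx]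
      have hL' : aLastScan (xs ++ [x]) (xs ++ [x]).length = (xs.length : Int) := by
        rw [hn1, aLastScan_append, if_neg hx]
      have hlast : PySem.List.pyGetD (xs ++ [x]) (xs.length : Int) 0 = x :=
        pyGetD_append_last xs x 0
      have hfinal : ∀ ms : Int × Int, [((xs.length : Int))].foldl (aStep (xs ++ [x]) types) ms
          = (ms.1, if x > 0 ∧ PySem.List.pyGetD types (xs.length : Int) "" = "s"
              then ms.2 + 1 else ms.2) := by
        intro ms
        simp only [List.foldl_cons, List.foldl_nil, aStep, hlast]
        split_ifs with c1 c2
        · rfl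
        · exact absurd c2.1 hx
        · rfl
      by_cases hf : aLead xs = xs.length
      · -- the first nonzero element
        have hsfirst : s.first = none := by rw [h1, if_pos hf]
        have hL : aLastScan xs xs.length = -1 := h8.mp hf
        have hms : (s.miss, s.stop) = (0, 0) := by
          rw [h3, hL, PySem.List.pyRange_one_eq_nil (by push_cast; omega), List.foldl_nil]
        have hpend : s.pending = [] := by rw [h4, if_pos hf]
        have hstep : bStep types s ((xs.length : Int), x) =
            { first := some (xs.length : Int), last := (xs.length : Int),
              stop := if x > 0 ∧ PySem.List.pyGetD types (xs.length : Int) "" = "s"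
                then s.stop + 1 else s.stop,
              miss := bCommit types s.miss s.pending, pending := [] } := by
          simp [bStep, hx, hsfirst]
        have hl' : aLead (xs ++ [x]) = xs.length := by rw [hl'any, if_pos hf]
        have hm0 : s.miss = 0 := congrArg Prod.fst hms
        have hs0 : s.stop = 0 := congrArg Prod.snd hms
        refine ⟨?_, ?_, ?_, ?_, ?_, ?_, ?_, ?_, ?_⟩
        · rw [hstep]
          show some ((xs.length : Int)) = _
          rw [hl', hn1, if_neg (by omega : ¬ (xs.length = xs.length + 1))]
        · rw [hstep]; show ((xs.length : Int)) = _; rw [hL']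
        · rw [hstep]
          show (bCommit types s.miss s.pending,
            if x > 0 ∧ PySem.List.pyGetD types (xs.length : Int) "" = "s"
              then s.stop + 1 else s.stop) = _
          rw [hL', hl', PySem.List.pyRange_one_singleton, hfinal]
          rw [hpend, hm0, hs0]
          simp [bCommit]
        · rw [hstep]
          show ([] : List Int) = _
          rw [if_neg (show ¬ (aLead (xs ++ [x]) = (xs ++ [x]).length) by rw [hl', hn1]; omega)]
          rw [hL', hn1]
          push_cast
          rw [PySem.List.pyRange_one_eq_nil (by omega)]
        · intro j hj1 hj2
          rw [hL'] at hj1; rw [hn1] at hj2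
          omega
        · rw [hL']; omega
        · rw [hL', hn1]; push_cast; omega
        · rw [hL', hl', hn1]
          constructor
          · intro hcon; omega
          · intro hcon; exfalso; omega
        · intro _; rw [hL', hl']
      · -- a nonzero after a nonzero: the buffered zeros are committed
        have hsfirst : s.first = some (aLead xs : Int) := by rw [h1, if_neg hf]
        have hfL : (aLead xs : Int) ≤ aLastScan xs xs.length := h9 hf
        have hstep : bStep types s ((xs.length : Int), x) =
            { first := some (aLead xs : Int), last := (xs.length : Int),
              stop := if x > 0 ∧ PySem.List.pyGetD types (xs.length : Int) "" = "s"
                then s.stop + 1 else s.stop,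
              miss := bCommit types s.miss s.pending, pending := [] } := by
          simp [bStep, hx, hsfirst]
        have hl' : aLead (xs ++ [x]) = aLead xs := by rw [hl'any, if_neg hf]
        refine ⟨?_, ?_, ?_, ?_, ?_, ?_, ?_, ?_, ?_⟩
        · rw [hstep]
          show some ((aLead xs : Int)) = _
          rw [hl', hn1, if_neg (by omega : ¬ (aLead xs = xs.length + 1))]
        · rw [hstep]; show ((xs.length : Int)) = _; rw [hL']
        · rw [hstep]
          show (bCommit types s.miss s.pending,
            if x > 0 ∧ PySem.List.pyGetD types (xs.length : Int) "" = "s"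
              then s.stop + 1 else s.stop) = _
          rw [hL', hl']
          rw [PySem.List.pyRange_one_append (aLead xs : Int) (aLastScan xs xs.length + 1)
            ((xs.length : Int) + 1) (by omega) (by omega), List.foldl_append]
          rw [PySem.List.pyRange_one_succ_right (show aLastScan xs xs.length + 1 ≤ (xs.length : Int) by omega),
            List.foldl_append]
          rw [hcongr, ← h3]
          rw [aStep_zero_run (xs ++ [x]) types _ hgz s.miss s.stop]
          rw [hfinal, h4, if_neg hf]
        · rw [hstep]
          show ([] : List Int) = _
          rw [if_neg (show ¬ (aLead (xs ++ [x]) = (xs ++ [x]).length) by rw [hl', hn1]; omega)]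
          rw [hL', hn1]
          push_cast
          rw [PySem.List.pyRange_one_eq_nil (by omega)]
        · intro j hj1 hj2
          rw [hL'] at hj1; rw [hn1] at hj2
          omega
        · rw [hL']; omega
        · rw [hL', hn1]; push_cast; omega
        · rw [hL', hl', hn1]
          constructor
          · intro hcon; omega
          · intro hcon; exfalso; omega
        · intro _; rw [hL', hl']; omega

theorem ports_agree (vector : List Int) (types : List String) :
    vector_values vector types = vector_values_alt vector types := by
  obtain ⟨h1, h2, h3, h4, h5, h6, h7, h8, h9⟩ := bFold_inv types vector
  have hfirst : ((PySem.List.enumerate vector 0).foldl (bStep types)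
      ⟨none, -1, 0, 0, []⟩).first.getD (vector.length : Int) = (aLead vector : Int) := by
    rw [h1]
    by_cases hf : aLead vector = vector.length
    · rw [if_pos hf, hf]; rfl
    · rw [if_neg hf]; rfl
  simp only [vector_values, vector_values_alt]
  rw [h2, hfirst, ← h3]

-- ===== VERDICT (by name: the statement is the Claim_ definition above) =====
theorem vector_values_spec : Claim_equal_vector_values := by
  intro vector types _ _
  unfold Spec_vector_values
  exact ports_agree vector types
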